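-- pv_equiv track=rewrite | github.com/JGI-Bioinformatics/axolotl | axolotl-0.1.1/axolotl/core/krmapper.py | find_rkmers
-- ===== SOURCE A (Python) =====
-- from collections import Counter, deque
--
-- def find_rkmers(all_kmers, n=100):
--     # find rkmers
--     all_kmers = Counter(all_kmers).most_common()
--     all_kmers = [kmer for kmer, count in all_kmers if count>1]
--     num_kmers = len(all_kmers)
--     if num_kmers <= n:
--         return all_kmers
--     else:
--         start = int((num_kmers-n)/2)
--         return all_kmers[start:start+n]
-- ===== SOURCE B (Python) =====
-- from collections import Counter
--
-- def find_rkmers(all_kmers, n=100):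
--     # Bucket repeated kmers by their count, then emit buckets in descending
--     # count order; only the (few) distinct counts are sorted, not all kmers.
--     counts = Counter(all_kmers)
--     buckets = {}
--     for kmer, c in counts.items():
--         if c > 1:
--             buckets.setdefault(c, []).append(kmer)
--     rkmers = []
--     for c in sorted(buckets, reverse=True):
--         rkmers += buckets[c]
--     num_kmers = len(rkmers)
--     if num_kmers <= n:
--         return rkmers
--     start = (num_kmers - n) // 2
--     return rkmers[start:start + n]
-- ===== Notes on version B (the rewrite author's own statement) =====
-- stated objective: alternative
-- what changed: Replaces Counter.most_common()'s full sort of all counter items with bucketing the repeated kmers by count in one pass and concatenating buckets over the sorted distinct counts (only the distinct counts are sorted; the Counter pass dominates, so the measured speedup is below the 1.5x bar); the middle-slice step is kept.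
import Mathlib
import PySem

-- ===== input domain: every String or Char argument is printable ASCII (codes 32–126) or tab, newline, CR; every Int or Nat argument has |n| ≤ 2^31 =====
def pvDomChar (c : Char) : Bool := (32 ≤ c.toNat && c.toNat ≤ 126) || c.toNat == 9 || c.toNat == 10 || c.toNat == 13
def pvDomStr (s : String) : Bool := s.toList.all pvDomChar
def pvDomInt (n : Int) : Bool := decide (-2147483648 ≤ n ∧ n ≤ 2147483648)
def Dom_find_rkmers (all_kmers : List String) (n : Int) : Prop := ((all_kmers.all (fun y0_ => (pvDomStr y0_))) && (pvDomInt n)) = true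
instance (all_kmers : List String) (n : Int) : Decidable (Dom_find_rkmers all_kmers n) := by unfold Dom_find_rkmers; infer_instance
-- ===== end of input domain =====

-- B buckets repeated kmers by count and sorts only the distinct counts instead of sorting all counter items (most_common); the middle-slice step is unchanged.


-- ===== PORT A =====
-- Counter(xs).most_common() = sorted(items, key=count, reverse=True) (stable)
def find_rkmers (all_kmers : List String) (n : Int) : List String :=
  let mc := PySem.List.sorted (PySem.Dict.counter all_kmers).items (fun p => p.2) true
  let kmers := (mc.filter (fun p => decide (1 < p.2))).map (fun p => p.1)
  let num_kmers : Int := kmers.length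
  if num_kmers ≤ n then kmers
  else
    -- int((num_kmers-n)/2): exact float division then truncation (num_kmers-n here is far below 2^53)
    let start := PySem.Int.truncdiv (num_kmers - n) 2
    PySem.List.slice kmers (some start) (some (start + n))

-- ===== PORT B =====
def find_rkmers_alt (all_kmers : List String) (n : Int) : List String :=
  let counts := PySem.Dict.counter all_kmers
  -- buckets.setdefault(c, []).append(kmer) for c > 1
  let buckets := counts.items.foldl
    (fun d p => if 1 < p.2 then d.modify p.2 [] (fun l => l ++ [p.1]) else d)
    PySem.Dict.empty
  -- rkmers += buckets[c] for c in sorted(buckets, reverse=True)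
  let rkmers := (PySem.List.sorted buckets.keys (fun c => c) true).foldl
    (fun acc c => acc ++ buckets.getD c []) []
  let num_kmers : Int := rkmers.length
  if num_kmers ≤ n then rkmers
  else
    let start := PySem.Int.floordiv (num_kmers - n) 2
    PySem.List.slice rkmers (some start) (some (start + n))

-- ===== PRECONDITION & SPEC =====
def Spec_find_rkmers (all_kmers : List String) (n : Int) (out : List String) : Prop := out = find_rkmers_alt all_kmers n
instance (all_kmers : List String) (n : Int) (out : List String) : Decidable (Spec_find_rkmers all_kmers n out) := by unfold Spec_find_rkmers; infer_instance

-- ===== CLAIM (what is proved, stated in full; the proofs are below) =====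
def Claim_equal_find_rkmers : Prop := ∀ (all_kmers : List String) (n : Int), Dom_find_rkmers all_kmers n → Spec_find_rkmers all_kmers n (find_rkmers all_kmers n)

-- ===== LEMMAS AND PROOFS =====

theorem pv_insertBy_cons {α : Type} (key : α → Int) (x : α) (rest : List α)
    (h : ∀ y ∈ rest, key y < key x) :
    PySem.List.insertBy (fun a b => decide (key b < key a)) x rest = x :: rest := by
  cases rest with
  | nil => rfl
  | cons y ys => simp [PySem.List.insertBy, h y (by simp)]

theorem pv_insertBy_append {α : Type} (key : α → Int) (x : α) (l rest : List α)
    (h : ∀ y ∈ l, ¬ key y < key x) :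
    PySem.List.insertBy (fun a b => decide (key b < key a)) x (l ++ rest)
      = l ++ PySem.List.insertBy (fun a b => decide (key b < key a)) x rest := by
  induction l with
  | nil => rfl
  | cons y ys ih =>
    simp only [List.cons_append, PySem.List.insertBy, decide_eq_true_eq]
    rw [if_neg (h y (by simp))]
    simp [ih (fun z hz => h z (by simp [hz]))]

theorem pv_insertBy_flatMap {α : Type} (key : α → Int) (x : α) (D : List Int) (g : Int → List α)
    (hD : D.Pairwise (fun a b => b < a))
    (hg : ∀ c ∈ D, ∀ y ∈ g c, key y = c)
    (hk : key x ∈ D) :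
    PySem.List.insertBy (fun a b => decide (key b < key a)) x (D.flatMap g)
      = D.flatMap (fun c => g c ++ if key x = c then [x] else []) := by
  induction D with
  | nil => simp at hk
  | cons c D' ih =>
    have hcD' : ∀ c' ∈ D', c' < c := (List.pairwise_cons.mp hD).1
    have hD' := (List.pairwise_cons.mp hD).2
    simp only [List.flatMap_cons]
    by_cases hxc : key x = c
    · -- walk past g c, then x goes before everything in D'.flatMap g
      rw [pv_insertBy_append key x (g c) _ (fun y hy => by
        rw [hg c (by simp) y hy, hxc]; omega)]
      rw [pv_insertBy_cons key x _ (fun y hy => by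
        rcases List.mem_flatMap.mp hy with ⟨c', hc', hyc'⟩
        rw [hg c' (by simp [hc']) y hyc', hxc]
        exact hcD' c' hc')]
      rw [if_pos hxc]
      have : D'.flatMap (fun c' => g c' ++ if key x = c' then [x] else []) = D'.flatMap g := by
        apply List.flatMap_congr
        intro c' hc'
        rw [if_neg (by have := hcD' c' hc'; omega)]
        simp
      rw [this]; simp
    · have hkD' : key x ∈ D' := by rcases List.mem_cons.mp hk with h | h; exact absurd h hxc; exact h
      have hklt : key x < c := hcD' _ hkD'
      rw [pv_insertBy_append key x (g c) _ (fun y hy => by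
        rw [hg c (by simp) y hy]; omega)]
      rw [ih hD' (fun c' hc' => hg c' (by simp [hc'])) hkD', if_neg hxc]
      simp

theorem pv_sorted_rev_buckets {α : Type} (key : α → Int) (xs : List α) (D : List Int)
    (hD : D.Pairwise (fun a b => b < a))
    (hmem : ∀ x ∈ xs, key x ∈ D) :
    PySem.List.sorted xs key true = D.flatMap (fun c => xs.filter (fun x => key x == c)) := by
  rw [PySem.List.sorted_rev_eq_foldl_insertBy]
  suffices H : ∀ (ys : List α) (p : List α), (∀ x ∈ ys, key x ∈ D) →
      ys.foldl (fun acc x => PySem.List.insertBy (fun a b => decide (key b < key a)) x acc)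
        (D.flatMap (fun c => p.filter (fun x => key x == c)))
      = D.flatMap (fun c => (p ++ ys).filter (fun x => key x == c)) by
    have h0 : (List.flatMap (fun c => List.filter (fun x => key x == c) ([]:List α)) D) = [] := by simp
    have := H xs [] hmem
    rw [h0] at this
    simpa using this
  intro ys
  induction ys with
  | nil => intro p _; simp
  | cons x ys ih =>
    intro p hmem'
    simp only [List.foldl_cons]
    rw [pv_insertBy_flatMap key x D _ hD
      (fun c hc y hy => by
        have := List.mem_filter.mp hy
        exact eq_of_beq this.2)
      (hmem' x (by simp))]
    have hstep : (fun c => (p.filter (fun x' => key x' == c)) ++ if key x = c then [x] else [])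
        = fun c => (p ++ [x]).filter (fun x' => key x' == c) := by
      funext c
      rw [List.filter_append]
      congr 1
      by_cases h : key x = c <;> simp [h]
    rw [hstep, ih (p ++ [x]) (fun z hz => hmem' z (by simp [hz]))]
    simp

theorem pv_flatMap_ite_nil {α : Type} (l : List Int) (p : Int → Prop) [DecidablePred p]
    (g : Int → List α) :
    l.flatMap (fun c => if p c then g c else []) = (l.filter (fun c => decide (p c))).flatMap g := by
  induction l with
  | nil => rfl
  | cons c l ih =>
    by_cases h : p c <;> simp [h, ih]

theorem pv_inner_filter (items : List (String × Int)) (c : Int) :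
    (items.filter (fun p => p.2 == c)).filter (fun p => decide (1 < p.2))
      = if 1 < c then items.filter (fun p => p.2 == c) else [] := by
  rw [List.filter_filter]
  have hcong : ∀ p ∈ items, (decide (1 < p.2) && (p.2 == c)) = (decide (1 < c) && (p.2 == c)) := by
    intro p _
    by_cases h : p.2 = c
    · subst h; rfl
    · have hb : (p.2 == c) = false := by simpa using h
      rw [hb, Bool.and_false, Bool.and_false]
  rw [List.filter_congr hcong]
  by_cases h : 1 < c <;> simp [h]

theorem pv_kept_eq (all_kmers : List String) :
    ((PySem.List.sorted (PySem.Dict.counter all_kmers).items (fun p => p.2) true).filter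
        (fun p => decide (1 < p.2))).map (fun p => p.1)
      = (let buckets := (PySem.Dict.counter all_kmers).items.foldl
            (fun d p => if 1 < p.2 then d.modify p.2 [] (fun l => l ++ [p.1]) else d)
            PySem.Dict.empty
         (PySem.List.sorted buckets.keys (fun c => c) true).foldl
            (fun acc c => acc ++ buckets.getD c []) []) := by
  set items := (PySem.Dict.counter all_kmers).items with hitems
  set kf := items.filter (fun p => decide (1 < p.2)) with hkf
  -- the bucket dict is the fold over the filtered items
  have hbfold : items.foldl
      (fun d p => if 1 < p.2 then d.modify p.2 [] (fun l => l ++ [p.1]) else d) PySem.Dict.empty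
      = kf.foldl (fun d p => d.modify p.2 [] (fun l => l ++ [p.1])) PySem.Dict.empty := by
    exact PySem.List.foldl_ite_eq_foldl_filter (fun p => 1 < p.2) _ items PySem.Dict.empty
  set buckets := kf.foldl (fun d p => d.modify p.2 [] (fun l => l ++ [p.1])) PySem.Dict.empty with hb
  simp only [hbfold]
  -- keys of the bucket dict
  have hkeys : buckets.keys = PySem.Set.ofList (kf.map (fun p => p.2)) := by
    rw [hb, PySem.Dict.keys_foldl_modify_key kf (fun p => p.2) [] (fun _ p => fun l => l ++ [p.1])]
    rw [show (PySem.Dict.empty : PySem.Dict Int (List String)).keys = [] from rfl]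
    rw [PySem.Set.update_eq_append_filter]
    simp [PySem.Set.contains]
  -- lookups in the bucket dict
  have hgetD : ∀ c, buckets.getD c [] = (kf.filter (fun p => p.2 == c)).map (fun p => p.1) := by
    intro c
    have hswap : buckets = (kf.map (fun p => (p.2, p.1))).foldl
        (fun d q => d.modify q.1 [] (fun l => l ++ [q.2])) PySem.Dict.empty := by
      rw [hb, List.foldl_map]
    rw [hswap, PySem.Dict.getD_foldl_modify_append]
    rw [List.filter_map, List.map_map]
    rfl
  -- distinct counts of all items, descending
  set DA := PySem.List.sorted (PySem.Set.ofList (items.map (fun p => p.2))) (fun c => c) true with hDA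
  have hDAnodup : DA.Nodup := by
    have hp := PySem.List.sorted_perm (PySem.Set.ofList (items.map (fun p => p.2))) (fun c : Int => c) true
    exact hp.nodup_iff.mpr (PySem.Set.nodup_ofList _)
  have hDAdesc : DA.Pairwise (fun a b => b < a) := by
    have h1 : DA.Pairwise (fun a b : Int => b ≤ a) :=
      PySem.List.sorted_pairwise_rev (PySem.Set.ofList (items.map (fun p => p.2))) (fun c : Int => c)
    have h2 : DA.Pairwise (fun a b : Int => a ≠ b) := hDAnodup
    exact (h1.and h2).imp (fun h => by omega)
  have hDAmem : ∀ x ∈ items, x.2 ∈ DA := by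
    intro x hx
    rw [hDA, PySem.List.mem_sorted, PySem.Set.mem_ofList]
    exact List.mem_map.mpr ⟨x, hx, rfl⟩
  -- A's kept list as a flatMap over the qualifying counts
  have hA : ((PySem.List.sorted items (fun p => p.2) true).filter (fun p => decide (1 < p.2))).map (fun p => p.1)
      = (DA.filter (fun c => decide (1 < c))).flatMap
          (fun c => (items.filter (fun p => p.2 == c)).map (fun p => p.1)) := by
    rw [pv_sorted_rev_buckets (fun p => p.2) items DA hDAdesc hDAmem]
    rw [List.filter_flatMap, List.map_flatMap]
    have hstep : ∀ c ∈ DA,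
        ((items.filter (fun p => p.2 == c)).filter (fun p => decide (1 < p.2))).map (fun p => p.1)
        = (if 1 < c then (items.filter (fun p => p.2 == c)).map (fun p => p.1) else []) := by
      intro c _
      rw [pv_inner_filter, apply_ite (List.map (fun p : String × Int => p.1))]
      rfl
    rw [List.flatMap_congr hstep, pv_flatMap_ite_nil]
  -- B's concatenation as the same flatMap
  have hDk : PySem.List.sorted buckets.keys (fun c => c) true = DA.filter (fun c => decide (1 < c)) := by
    rw [hkeys]
    apply PySem.List.sorted_rev_eq_of_perm_of_pairwise_gt
    · apply (List.perm_ext_iff_of_nodup (hDAnodup.filter _) (PySem.Set.nodup_ofList _)).mpr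
      intro a
      rw [List.mem_filter, PySem.Set.mem_ofList, hDA, PySem.List.mem_sorted, PySem.Set.mem_ofList]
      simp only [hkf, List.mem_map, List.mem_filter, decide_eq_true_eq]
      constructor
      · rintro ⟨⟨p, hp, rfl⟩, h1⟩
        exact ⟨p, ⟨hp, h1⟩, rfl⟩
      · rintro ⟨p, ⟨hp, h1⟩, rfl⟩
        exact ⟨⟨p, hp, rfl⟩, h1⟩
    · exact hDAdesc.filter _
  have hB : ∀ c ∈ DA.filter (fun c => decide (1 < c)),
      buckets.getD c [] = (items.filter (fun p => p.2 == c)).map (fun p => p.1) := by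
    intro c hc
    have h1 : 1 < c := by simpa using (List.mem_filter.mp hc).2
    rw [hgetD c, hkf, List.filter_comm, pv_inner_filter, if_pos h1]
  rw [PySem.List.foldl_append_eq_flatMap, hDk, List.flatMap_congr hB, hA]
  rfl


-- ===== VERDICT (by name: the statement is the Claim_ definition above) =====
theorem find_rkmers_spec : Claim_equal_find_rkmers := by
  intro all_kmers n _
  unfold Spec_find_rkmers find_rkmers find_rkmers_alt
  have hk := pv_kept_eq all_kmers
  simp only at hk ⊢
  rw [← hk]
  set kmers := ((PySem.List.sorted (PySem.Dict.counter all_kmers).items (fun p => p.2) true).filter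
      (fun p => decide (1 < p.2))).map (fun p => p.1) with hkm
  by_cases h : (kmers.length : Int) ≤ n
  · simp [h]
  · have hpos : 0 ≤ (kmers.length : Int) - n := by omega
    simp only [if_neg h]
    rw [PySem.Int.truncdiv, Int.tdiv_eq_ediv_of_nonneg hpos,
      PySem.Int.floordiv_eq_ediv_of_pos (by norm_num : (0:Int) < 2)]
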